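-- pv_equiv track=rewrite | github.com/cirosantilli/project-euler-solvers | solvers/212.py | generate_cuboids
-- ===== SOURCE A (Python) =====
-- def generate_cuboids(n: int) -> list[tuple[int, int, int, int, int, int]]:
--     """
--     Returns cuboids as (x0, x1, y0, y1, z0, z1) with half-open intervals.
--     """
--     m = 6 * n
--     MOD = 1_000_000
--     S = [0] * (m + 1)  # 1-indexed
--
--     # S_1..S_55
--     upto = min(55, m)
--     for k in range(1, upto + 1):
--         S[k] = (100003 - 200003 * k + 300007 * k * k * k) % MOD
--
--     # S_56..S_m
--     for k in range(56, m + 1):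
--         S[k] = (S[k - 24] + S[k - 55]) % MOD
--
--     cubs: list[tuple[int, int, int, int, int, int]] = []
--     for i in range(1, n + 1):
--         x0 = S[6 * i - 5] % 10000
--         y0 = S[6 * i - 4] % 10000
--         z0 = S[6 * i - 3] % 10000
--         dx = 1 + (S[6 * i - 2] % 399)
--         dy = 1 + (S[6 * i - 1] % 399)
--         dz = 1 + (S[6 * i] % 399)
--         cubs.append((x0, x0 + dx, y0, y0 + dy, z0, z0 + dz))
--     return cubs
-- ===== SOURCE B (Python) =====
-- def generate_cuboids(n: int) -> list[tuple[int, int, int, int, int, int]]: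
--     """
--     Returns cuboids as (x0, x1, y0, y1, z0, z1) with half-open intervals.
--     Single fused pass keeping only a rolling 55-term window of the
--     lagged-Fibonacci sequence instead of the full array.
--     """
--     MOD = 1_000_000
--     cubs: list[tuple[int, int, int, int, int, int]] = []
--     win: list[int] = []   # the last (up to) 55 terms S_{k-54}..S_k
--     six: list[int] = []   # terms of the group currently being collected
--     for k in range(1, 6 * n + 1):
--         if k <= 55:
--             t = (100003 - 200003 * k + 300007 * k * k * k) % MOD
--         else:
--             # S_{k-55} is win[0], S_{k-24} is win[31]
--             t = (win[0] + win[31]) % MOD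
--         win.append(t)
--         if len(win) > 55:
--             del win[0]
--         six.append(t)
--         if len(six) == 6:
--             x0 = six[0] % 10000
--             y0 = six[1] % 10000
--             z0 = six[2] % 10000
--             dx = 1 + six[3] % 399
--             dy = 1 + six[4] % 399
--             dz = 1 + six[5] % 399
--             cubs.append((x0, x0 + dx, y0, y0 + dy, z0, z0 + dz))
--             six = []
--     return cubs
-- ===== Notes on version B (the rewrite author's own statement) =====
-- stated objective: alternative
-- what changed: Replaces A's preallocated full S-array and three separate loops by one fused loop that keeps only a rolling 55-term window of the lagged-Fibonacci sequence (O(1) extra memory) and emits a cuboid every six terms.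
import Mathlib
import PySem

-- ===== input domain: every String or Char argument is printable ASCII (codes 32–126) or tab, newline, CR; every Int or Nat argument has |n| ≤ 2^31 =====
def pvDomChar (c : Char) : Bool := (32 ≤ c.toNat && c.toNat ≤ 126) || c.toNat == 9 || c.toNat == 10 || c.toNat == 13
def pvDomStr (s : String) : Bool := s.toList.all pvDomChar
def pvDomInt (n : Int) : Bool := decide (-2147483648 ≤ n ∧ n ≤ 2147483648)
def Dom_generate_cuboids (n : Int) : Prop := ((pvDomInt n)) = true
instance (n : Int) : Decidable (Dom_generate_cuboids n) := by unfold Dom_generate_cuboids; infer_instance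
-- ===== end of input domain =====

-- B replaces A's preallocated full S-array and its three separate loops by one fused
-- loop that keeps only a rolling 55-term window of the lagged-Fibonacci sequence and
-- emits a cuboid every six terms (objective: alternative — O(1) auxiliary space).

-- ===== PORT A =====
-- A-side helpers: the three loop bodies of A.
def pvASeed (MOD : Int) (S : List Int) (k : Int) : List Int :=
  PySem.List.pySetD S k (PySem.Int.mod (100003 - 200003 * k + 300007 * k * k * k) MOD)

def pvARec (MOD : Int) (S : List Int) (k : Int) : List Int :=
  PySem.List.pySetD S k
    (PySem.Int.mod (PySem.List.pyGetD S (k - 24) 0 + PySem.List.pyGetD S (k - 55) 0) MOD)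

def pvAEmit (S : List Int) (cubs : List (Int × Int × Int × Int × Int × Int)) (i : Int) :
    List (Int × Int × Int × Int × Int × Int) :=
  let x0 := PySem.Int.mod (PySem.List.pyGetD S (6 * i - 5) 0) 10000
  let y0 := PySem.Int.mod (PySem.List.pyGetD S (6 * i - 4) 0) 10000
  let z0 := PySem.Int.mod (PySem.List.pyGetD S (6 * i - 3) 0) 10000
  let dx := 1 + PySem.Int.mod (PySem.List.pyGetD S (6 * i - 2) 0) 399
  let dy := 1 + PySem.Int.mod (PySem.List.pyGetD S (6 * i - 1) 0) 399
  let dz := 1 + PySem.Int.mod (PySem.List.pyGetD S (6 * i) 0) 399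
  cubs ++ [(x0, x0 + dx, y0, y0 + dy, z0, z0 + dz)]

def generate_cuboids (n : Int) : List (Int × Int × Int × Int × Int × Int) :=
  let m : Int := 6 * n
  let MOD : Int := 1000000
  let S : List Int := List.replicate (m + 1).toNat 0       -- [0] * (m + 1)
  let upto : Int := min 55 m
  let S := (PySem.List.pyRange 1 (upto + 1)).foldl (pvASeed MOD) S
  let S := (PySem.List.pyRange 56 (m + 1)).foldl (pvARec MOD) S
  (PySem.List.pyRange 1 (n + 1)).foldl (pvAEmit S) []

-- ===== PORT B =====
-- B-side helper: the body of B's single fused loop; state = (win, six, cubs).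
def pvBStep (MOD : Int) (st : List Int × List Int × List (Int × Int × Int × Int × Int × Int))
    (k : Int) : List Int × List Int × List (Int × Int × Int × Int × Int × Int) :=
  let t := if k ≤ 55 then PySem.Int.mod (100003 - 200003 * k + 300007 * k * k * k) MOD
           else PySem.Int.mod (PySem.List.pyGetD st.1 0 0 + PySem.List.pyGetD st.1 31 0) MOD
  let win := st.1 ++ [t]
  let win := if 55 < win.length then win.tail else win      -- del win[0]
  let six := st.2.1 ++ [t]
  if six.length = 6 then
    let x0 := PySem.Int.mod (PySem.List.pyGetD six 0 0) 10000
    let y0 := PySem.Int.mod (PySem.List.pyGetD six 1 0) 10000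
    let z0 := PySem.Int.mod (PySem.List.pyGetD six 2 0) 10000
    let dx := 1 + PySem.Int.mod (PySem.List.pyGetD six 3 0) 399
    let dy := 1 + PySem.Int.mod (PySem.List.pyGetD six 4 0) 399
    let dz := 1 + PySem.Int.mod (PySem.List.pyGetD six 5 0) 399
    (win, [], st.2.2 ++ [(x0, x0 + dx, y0, y0 + dy, z0, z0 + dz)])
  else (win, six, st.2.2)

def generate_cuboids_alt (n : Int) : List (Int × Int × Int × Int × Int × Int) :=
  let MOD : Int := 1000000
  ((PySem.List.pyRange 1 (6 * n + 1)).foldl (pvBStep MOD) ([], [], [])).2.2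

-- ===== PRECONDITION & SPEC =====
def Spec_generate_cuboids (n : Int) (out : List (Int × Int × Int × Int × Int × Int)) : Prop := out = generate_cuboids_alt n
instance (n : Int) (out : List (Int × Int × Int × Int × Int × Int)) : Decidable (Spec_generate_cuboids n out) := by unfold Spec_generate_cuboids; infer_instance

-- ===== CLAIM (what is proved, stated in full; the proofs are below) =====
def Claim_equal_generate_cuboids : Prop := ∀ (n : Int), Dom_generate_cuboids n → Spec_generate_cuboids n (generate_cuboids n)

-- ===== LEMMAS AND PROOFS =====

-- The mathematical lagged-Fibonacci sequence S_k both programs compute.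
def pvS (k : Int) : Int :=
  if h : k ≤ 55 then PySem.Int.mod (100003 - 200003 * k + 300007 * k * k * k) 1000000
  else PySem.Int.mod (pvS (k - 24) + pvS (k - 55)) 1000000
termination_by k.toNat
decreasing_by all_goals omega

lemma pvS_le {k : Int} (h : k ≤ 55) :
    pvS k = PySem.Int.mod (100003 - 200003 * k + 300007 * k * k * k) 1000000 := by
  rw [pvS]; simp [h]

lemma pvS_gt {k : Int} (h : ¬ k ≤ 55) :
    pvS k = PySem.Int.mod (pvS (k - 24) + pvS (k - 55)) 1000000 := by
  rw [pvS]; simp [h]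

-- The i-th cuboid, in terms of pvS.
def pvCub (i : Int) : Int × Int × Int × Int × Int × Int :=
  let x0 := PySem.Int.mod (pvS (6 * i - 5)) 10000
  let y0 := PySem.Int.mod (pvS (6 * i - 4)) 10000
  let z0 := PySem.Int.mod (pvS (6 * i - 3)) 10000
  let dx := 1 + PySem.Int.mod (pvS (6 * i - 2)) 399
  let dy := 1 + PySem.Int.mod (pvS (6 * i - 1)) 399
  let dz := 1 + PySem.Int.mod (pvS (6 * i)) 399
  (x0, x0 + dx, y0, y0 + dy, z0, z0 + dz)

-- read-after-write on a Python list, Int indices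
lemma pv_getD_setD_eq (xs : List Int) {i : Int} (v : Int) (hi0 : 0 ≤ i)
    (hil : i < (xs.length : Int)) :
    PySem.List.pyGetD (PySem.List.pySetD xs i v) i 0 = v := by
  have hi := Int.toNat_of_nonneg hi0
  rw [← hi, PySem.List.pyGetD_pySetD_natCast _ _ _ _ _ (by omega), if_pos rfl]

lemma pv_getD_setD_ne (xs : List Int) {i j : Int} (v : Int) (hi0 : 0 ≤ i)
    (hil : i < (xs.length : Int)) (hj0 : 0 ≤ j) (hne : j ≠ i) :
    PySem.List.pyGetD (PySem.List.pySetD xs i v) j 0 = PySem.List.pyGetD xs j 0 := by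
  have hi := Int.toNat_of_nonneg hi0
  have hj := Int.toNat_of_nonneg hj0
  rw [← hi, ← hj, PySem.List.pyGetD_pySetD_natCast _ _ _ _ _ (by omega), if_neg (by omega)]

-- ---- A side ----

-- state of A's array after the seed loop up to bound u+1
lemma pvA_seed_inv (m : Int) (hm : 0 ≤ m) :
    ∀ u : Int, 0 ≤ u → u ≤ min 55 m →
      ((PySem.List.pyRange 1 (u + 1)).foldl (pvASeed 1000000)
          (List.replicate (m + 1).toNat 0)).length = (m + 1).toNat ∧
      ∀ j : Int, 1 ≤ j → j ≤ u →
        PySem.List.pyGetD ((PySem.List.pyRange 1 (u + 1)).foldl (pvASeed 1000000)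
          (List.replicate (m + 1).toNat 0)) j 0 = pvS j := by
  intro u hu
  induction u, hu using Int.le_induction with
  | base =>
    intro _
    rw [PySem.List.pyRange_one_eq_nil (a := 1) (b := 0 + 1) (by omega)]
    exact ⟨by simp, fun j hj1 hj2 => absurd (hj1.trans hj2) (by omega)⟩
  | succ u hu ih =>
    intro hub
    obtain ⟨hlen, hval⟩ := ih (by omega)
    rw [PySem.List.pyRange_one_succ_right (a := 1) (b := u + 1) (by omega), List.foldl_append]
    simp only [List.foldl_cons, List.foldl_nil]
    generalize hR : List.foldl (pvASeed 1000000) (List.replicate (m + 1).toNat 0)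
      (PySem.List.pyRange 1 (u + 1)) = R at hlen hval ⊢
    unfold pvASeed
    refine ⟨by rw [PySem.List.length_pySetD]; exact hlen, fun j hj1 hj2 => ?_⟩
    by_cases h : j = u + 1
    · rw [h, pv_getD_setD_eq _ _ (by omega) (by rw [hlen]; omega), pvS_le (by omega)]
    · rw [pv_getD_setD_ne _ _ (by omega) (by rw [hlen]; omega) (by omega) h]
      exact hval j hj1 (by omega)

-- state of A's array after both fill loops
lemma pvA_fill_inv (m : Int) (hm : 0 ≤ m) :
    ∀ j : Int, 1 ≤ j → j ≤ m →
      PySem.List.pyGetD ((PySem.List.pyRange 56 (m + 1)).foldl (pvARec 1000000)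
        ((PySem.List.pyRange 1 (min 55 m + 1)).foldl (pvASeed 1000000)
          (List.replicate (m + 1).toNat 0))) j 0 = pvS j := by
  by_cases hm55 : m ≤ 55
  · rw [PySem.List.pyRange_one_eq_nil (a := 56) (b := m + 1) (by omega)]
    simp only [List.foldl_nil]
    have hmin : min 55 m = m := by omega
    rw [hmin]
    exact (pvA_seed_inv m hm m hm (by omega)).2
  · -- m ≥ 56 : seed fills 1..55, then induct on the recurrence loop bound
    have hmin : min 55 m = 55 := by omega
    rw [hmin]
    have base := pvA_seed_inv m hm 55 (by omega) (by omega)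
    have main : ∀ v : Int, 55 ≤ v → v ≤ m →
        ((PySem.List.pyRange 56 (v + 1)).foldl (pvARec 1000000)
          ((PySem.List.pyRange 1 (55 + 1)).foldl (pvASeed 1000000)
            (List.replicate (m + 1).toNat 0))).length = (m + 1).toNat ∧
        ∀ j : Int, 1 ≤ j → j ≤ v →
          PySem.List.pyGetD ((PySem.List.pyRange 56 (v + 1)).foldl (pvARec 1000000)
            ((PySem.List.pyRange 1 (55 + 1)).foldl (pvASeed 1000000)
              (List.replicate (m + 1).toNat 0))) j 0 = pvS j := by
      intro v hv
      induction v, hv using Int.le_induction with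
      | base =>
        intro _
        rw [PySem.List.pyRange_one_eq_nil (a := 56) (b := 55 + 1) (by omega)]
        simp only [List.foldl_nil]
        exact ⟨base.1, fun j h1 h2 => base.2 j h1 h2⟩
      | succ v hv ih =>
        intro hvm
        obtain ⟨hlen, hval⟩ := ih (by omega)
        rw [PySem.List.pyRange_one_succ_right (a := 56) (b := v + 1) (by omega), List.foldl_append]
        simp only [List.foldl_cons, List.foldl_nil]
        generalize hR : List.foldl (pvARec 1000000)
          (List.foldl (pvASeed 1000000) (List.replicate (m + 1).toNat 0)
            (PySem.List.pyRange 1 (55 + 1))) (PySem.List.pyRange 56 (v + 1)) = R at hlen hval ⊢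
        unfold pvARec
        refine ⟨by rw [PySem.List.length_pySetD]; exact hlen, fun j hj1 hj2 => ?_⟩
        by_cases h : j = v + 1
        · rw [h, pv_getD_setD_eq _ _ (by omega) (by rw [hlen]; omega),
              hval (v + 1 - 24) (by omega) (by omega),
              hval (v + 1 - 55) (by omega) (by omega),
              show pvS (v + 1) = _ from pvS_gt (k := v + 1) (by omega)]
        · rw [pv_getD_setD_ne _ _ (by omega) (by rw [hlen]; omega) (by omega) h]
          exact hval j hj1 (by omega)
    exact (main m (by omega) le_rfl).2

-- A's result in closed form
lemma pvA_closed (n : Int) (hn : 0 ≤ n) :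
    generate_cuboids n = (PySem.List.pyRange 1 (n + 1)).map pvCub := by
  unfold generate_cuboids
  have hfill := pvA_fill_inv (6 * n) (by omega)
  rw [PySem.List.foldl_congr_mem _ _ (fun cubs i => cubs ++ [pvCub i]) _ ?_]
  · rw [PySem.List.foldl_append_singleton_eq_map]; simp
  · intro acc i hi
    rw [PySem.List.mem_pyRange_one] at hi
    unfold pvAEmit pvCub
    rw [hfill (6 * i - 5) (by omega) (by omega), hfill (6 * i - 4) (by omega) (by omega),
        hfill (6 * i - 3) (by omega) (by omega), hfill (6 * i - 2) (by omega) (by omega),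
        hfill (6 * i - 1) (by omega) (by omega), hfill (6 * i) (by omega) (by omega)]

-- ---- B side ----

def pvWinOf (u : Int) : List Int := (PySem.List.pyRange (u - min u 55 + 1) (u + 1)).map pvS
def pvSixOf (u : Int) : List Int := (PySem.List.pyRange (6 * (u / 6) + 1) (u + 1)).map pvS
def pvCubsOf (u : Int) : List (Int × Int × Int × Int × Int × Int) :=
  (PySem.List.pyRange 1 (u / 6 + 1)).map pvCub

-- reading a numeral index from a mapped range
lemma pv_read_map_range (a b : Int) (k : Nat) (hk : (k : Int) < b - a) :
    ((PySem.List.pyRange a b).map pvS).getD k 0 = pvS (a + k) := by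
  have hlen : k < ((PySem.List.pyRange a b).map pvS).length := by
    rw [List.length_map, PySem.List.length_pyRange_one]; omega
  rw [List.getD_eq_getElem _ _ hlen, List.getElem_map, PySem.List.getElem_pyRange_one]

-- one iteration of B's loop preserves the invariant
lemma pvB_step (u : Int) (hu : 0 ≤ u) :
    pvBStep 1000000 (pvWinOf u, pvSixOf u, pvCubsOf u) (u + 1)
      = (pvWinOf (u + 1), pvSixOf (u + 1), pvCubsOf (u + 1)) := by
  have ht : (if u + 1 ≤ 55 then
        PySem.Int.mod (100003 - 200003 * (u + 1) + 300007 * (u + 1) * (u + 1) * (u + 1)) 1000000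
      else PySem.Int.mod (PySem.List.pyGetD (pvWinOf u) 0 0 + PySem.List.pyGetD (pvWinOf u) 31 0)
        1000000) = pvS (u + 1) := by
    by_cases h55 : u + 1 ≤ 55
    · rw [if_pos h55, pvS_le h55]
    · rw [if_neg h55]
      have h0 : PySem.List.pyGetD (pvWinOf u) 0 0 = pvS (u + 1 - 55) := by
        unfold pvWinOf
        rw [PySem.List.pyGetD_ofNat', pv_read_map_range _ _ 0 (by omega)]
        congr 1; push_cast; omega
      have h31 : PySem.List.pyGetD (pvWinOf u) 31 0 = pvS (u + 1 - 24) := by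
        unfold pvWinOf
        rw [PySem.List.pyGetD_ofNat', pv_read_map_range _ _ 31 (by omega)]
        congr 1; push_cast; omega
      rw [h0, h31, show pvS (u + 1) = _ from pvS_gt (k := u + 1) h55,
          Int.add_comm (pvS (u + 1 - 24)) (pvS (u + 1 - 55))]
  have hwapp : pvWinOf u ++ [pvS (u + 1)]
      = (PySem.List.pyRange (u - min u 55 + 1) (u + 1 + 1)).map pvS := by
    unfold pvWinOf
    rw [PySem.List.pyRange_one_succ_right (a := u - min u 55 + 1) (b := u + 1) (by omega),
        List.map_append, List.map_singleton]
  have hwlen : (pvWinOf u ++ [pvS (u + 1)]).length = (min u 55).toNat + 1 := by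
    unfold pvWinOf
    simp only [List.length_append, List.length_map, PySem.List.length_pyRange_one,
      List.length_singleton]
    omega
  have hwin : (if 55 < (pvWinOf u ++ [pvS (u + 1)]).length
        then (pvWinOf u ++ [pvS (u + 1)]).tail else pvWinOf u ++ [pvS (u + 1)])
      = pvWinOf (u + 1) := by
    by_cases h55 : u + 1 ≤ 55
    · rw [if_neg (by rw [hwlen]; omega), hwapp]
      unfold pvWinOf
      rw [show u - min u 55 + 1 = u + 1 - min (u + 1) 55 + 1 from by omega]
    · rw [if_pos (by rw [hwlen]; omega), hwapp,
          PySem.List.pyRange_one_cons (by omega), List.map_cons, List.tail_cons]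
      unfold pvWinOf
      rw [show u - min u 55 + 1 + 1 = u + 1 - min (u + 1) 55 + 1 from by omega]
  have hsapp : pvSixOf u ++ [pvS (u + 1)]
      = (PySem.List.pyRange (6 * (u / 6) + 1) (u + 1 + 1)).map pvS := by
    unfold pvSixOf
    rw [PySem.List.pyRange_one_succ_right (a := 6 * (u / 6) + 1) (b := u + 1) (by omega),
        List.map_append, List.map_singleton]
  have hslen : (pvSixOf u ++ [pvS (u + 1)]).length = (u % 6).toNat + 1 := by
    unfold pvSixOf
    simp only [List.length_append, List.length_map, PySem.List.length_pyRange_one,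
      List.length_singleton]
    omega
  simp only [pvBStep]
  rw [ht, hwin]
  by_cases h6 : u % 6 = 5
  · rw [if_pos (by rw [hslen]; omega)]
    have e0 : PySem.List.pyGetD (pvSixOf u ++ [pvS (u + 1)]) 0 0 = pvS (6 * (u / 6 + 1) - 5) := by
      rw [hsapp, PySem.List.pyGetD_ofNat', pv_read_map_range _ _ 0 (by omega)]
      congr 1; push_cast; omega
    have e1 : PySem.List.pyGetD (pvSixOf u ++ [pvS (u + 1)]) 1 0 = pvS (6 * (u / 6 + 1) - 4) := by
      rw [hsapp, PySem.List.pyGetD_ofNat', pv_read_map_range _ _ 1 (by omega)]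
      congr 1; push_cast; omega
    have e2 : PySem.List.pyGetD (pvSixOf u ++ [pvS (u + 1)]) 2 0 = pvS (6 * (u / 6 + 1) - 3) := by
      rw [hsapp, PySem.List.pyGetD_ofNat', pv_read_map_range _ _ 2 (by omega)]
      congr 1; push_cast; omega
    have e3 : PySem.List.pyGetD (pvSixOf u ++ [pvS (u + 1)]) 3 0 = pvS (6 * (u / 6 + 1) - 2) := by
      rw [hsapp, PySem.List.pyGetD_ofNat', pv_read_map_range _ _ 3 (by omega)]
      congr 1; push_cast; omega
    have e4 : PySem.List.pyGetD (pvSixOf u ++ [pvS (u + 1)]) 4 0 = pvS (6 * (u / 6 + 1) - 1) := by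
      rw [hsapp, PySem.List.pyGetD_ofNat', pv_read_map_range _ _ 4 (by omega)]
      congr 1; push_cast; omega
    have e5 : PySem.List.pyGetD (pvSixOf u ++ [pvS (u + 1)]) 5 0 = pvS (6 * (u / 6 + 1)) := by
      rw [hsapp, PySem.List.pyGetD_ofNat', pv_read_map_range _ _ 5 (by omega)]
      congr 1; push_cast; omega
    rw [e0, e1, e2, e3, e4, e5]
    have hcubs : pvCubsOf u ++ [pvCub (u / 6 + 1)] = pvCubsOf (u + 1) := by
      unfold pvCubsOf
      rw [show (u + 1) / 6 + 1 = u / 6 + 1 + 1 from by omega,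
          PySem.List.pyRange_one_succ_right (a := 1) (b := u / 6 + 1) (by omega),
          List.map_append, List.map_singleton]
    have hsix0 : pvSixOf (u + 1) = ([] : List Int) := by
      unfold pvSixOf
      rw [PySem.List.pyRange_one_eq_nil (by omega)]
      rfl
    rw [show (PySem.Int.mod (pvS (6 * (u / 6 + 1) - 5)) 10000,
          PySem.Int.mod (pvS (6 * (u / 6 + 1) - 5)) 10000
            + (1 + PySem.Int.mod (pvS (6 * (u / 6 + 1) - 2)) 399),
          PySem.Int.mod (pvS (6 * (u / 6 + 1) - 4)) 10000,
          PySem.Int.mod (pvS (6 * (u / 6 + 1) - 4)) 10000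
            + (1 + PySem.Int.mod (pvS (6 * (u / 6 + 1) - 1)) 399),
          PySem.Int.mod (pvS (6 * (u / 6 + 1) - 3)) 10000,
          PySem.Int.mod (pvS (6 * (u / 6 + 1) - 3)) 10000
            + (1 + PySem.Int.mod (pvS (6 * (u / 6 + 1))) 399))
        = pvCub (u / 6 + 1) from rfl, hcubs, hsix0]
  · rw [if_neg (by rw [hslen]; omega)]
    have hsix : pvSixOf u ++ [pvS (u + 1)] = pvSixOf (u + 1) := by
      rw [hsapp]
      unfold pvSixOf
      rw [show 6 * (u / 6) + 1 = 6 * ((u + 1) / 6) + 1 from by omega]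
    have hcubs : pvCubsOf u = pvCubsOf (u + 1) := by
      unfold pvCubsOf
      rw [show u / 6 + 1 = (u + 1) / 6 + 1 from by omega]
    rw [hsix, hcubs]

-- invariant of B's fused loop
lemma pvB_inv : ∀ u : Int, 0 ≤ u →
    (PySem.List.pyRange 1 (u + 1)).foldl (pvBStep 1000000) ([], [], [])
      = (pvWinOf u, pvSixOf u, pvCubsOf u) := by
  intro u hu
  induction u, hu using Int.le_induction with
  | base =>
    rw [PySem.List.pyRange_one_eq_nil (a := 1) (b := 0 + 1) (by omega)]
    unfold pvWinOf pvSixOf pvCubsOf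
    rw [PySem.List.pyRange_one_eq_nil (by omega), PySem.List.pyRange_one_eq_nil (by omega),
        PySem.List.pyRange_one_eq_nil (by omega)]
    rfl
  | succ u hu ih =>
    rw [PySem.List.pyRange_one_succ_right (a := 1) (b := u + 1) (by omega), List.foldl_append,
        ih]
    simp only [List.foldl_cons, List.foldl_nil]
    exact pvB_step u hu

-- B's result in closed form
lemma pvB_closed (n : Int) (hn : 0 ≤ n) :
    generate_cuboids_alt n = (PySem.List.pyRange 1 (n + 1)).map pvCub := by
  show ((PySem.List.pyRange 1 (6 * n + 1)).foldl (pvBStep 1000000) ([], [], [])).2.2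
      = (PySem.List.pyRange 1 (n + 1)).map pvCub
  rw [show (6 : Int) * n + 1 = 6 * n + 1 from rfl, pvB_inv (6 * n) (by omega)]
  unfold pvCubsOf
  rw [show 6 * n / 6 = n from by omega]

-- ===== VERDICT (by name: the statement is the Claim_ definition above) =====
theorem generate_cuboids_spec : Claim_equal_generate_cuboids := by
  intro n _
  unfold Spec_generate_cuboids
  by_cases hn : 0 ≤ n
  · rw [pvA_closed n hn, pvB_closed n hn]
  · show (PySem.List.pyRange 1 (n + 1)).foldl
        (pvAEmit ((PySem.List.pyRange 56 (6 * n + 1)).foldl (pvARec 1000000)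
          ((PySem.List.pyRange 1 (min 55 (6 * n) + 1)).foldl (pvASeed 1000000)
            (List.replicate (6 * n + 1).toNat 0)))) []
      = ((PySem.List.pyRange 1 (6 * n + 1)).foldl (pvBStep 1000000) ([], [], [])).2.2
    rw [PySem.List.pyRange_one_eq_nil (a := 1) (b := n + 1) (by omega),
        PySem.List.pyRange_one_eq_nil (a := 1) (b := 6 * n + 1) (by omega)]
    rfl
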